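-- pv_equiv track=rewrite | github.com/feamando/pmos | tools/meeting/relevance_comparison.py | _count_placeholders
-- ===== SOURCE A (Python) =====
-- def _count_placeholders(content: str) -> int:
--     """Count empty placeholder text."""
--     placeholders = [
--         "no data found",
--         "none found",
--         "no recent",
--         "not available",
--         "no outstanding",
--         "no previous",
--         "n/a",
--     ]
--     count = 0
--     content_lower = content.lower()
--     for p in placeholders:
--         count += content_lower.count(p)
--     return count
-- ===== SOURCE B (Python) =====
-- def _count_placeholders(content: str) -> int:
--     """Count empty placeholder text with a single left-to-right scan."""
--     placeholders = (
--         "no data found",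
--         "none found",
--         "no recent",
--         "not available",
--         "no outstanding",
--         "no previous",
--         "n/a",
--     )
--     s = content.lower()
--     return sum(
--         1
--         for i in range(len(s))
--         for p in placeholders
--         if s.startswith(p, i)
--     )
-- ===== Notes on version B (the rewrite author's own statement) =====
-- stated objective: alternative
-- what changed: Replaces seven separate str.count scans (one per placeholder phrase) by a single left-to-right pass that counts, at each position, which placeholders start there; the results agree because none of the fixed phrases can begin strictly inside an occurrence of itself.
import Mathlib
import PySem

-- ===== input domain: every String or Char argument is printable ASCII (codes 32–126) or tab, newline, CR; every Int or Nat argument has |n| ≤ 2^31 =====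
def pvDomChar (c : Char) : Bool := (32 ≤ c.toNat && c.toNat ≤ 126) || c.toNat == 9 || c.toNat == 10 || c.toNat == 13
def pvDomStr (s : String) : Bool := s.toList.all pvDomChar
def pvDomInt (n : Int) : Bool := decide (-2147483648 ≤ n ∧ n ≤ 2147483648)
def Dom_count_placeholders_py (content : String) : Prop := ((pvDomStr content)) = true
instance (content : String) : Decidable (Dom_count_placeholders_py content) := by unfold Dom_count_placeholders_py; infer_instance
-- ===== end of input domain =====

-- B replaces A's seven per-phrase str.count scans by one left-to-right scan that counts, at each
-- position, which placeholders start there (objective: alternative, same asymptotic cost).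

-- ===== PORT A =====
def count_placeholders_py (content : String) : Int :=
  let placeholders : List String :=
    ["no data found", "none found", "no recent", "not available",
     "no outstanding", "no previous", "n/a"]
  let content_lower := PySem.Str.lower content
  placeholders.foldl (fun count p => count + (PySem.Str.count content_lower p : Int)) 0

-- ===== PORT B =====
-- single scan over the start positions; s.startswith(p, i) is ported as p.isPrefixOf (s.drop i) (exact for 0 ≤ i)
def count_placeholders_py_alt (content : String) : Int :=
  let placeholders : List (List Char) :=
    ["no data found".toList, "none found".toList, "no recent".toList, "not available".toList,
     "no outstanding".toList, "no previous".toList, "n/a".toList]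
  let s := (PySem.Str.lower content).toList
  (List.range s.length).foldl
    (fun acc i => acc + ((placeholders.countP (fun p => p.isPrefixOf (s.drop i))) : Int)) 0

-- ===== PRECONDITION & SPEC =====
def Spec_count_placeholders_py (content : String) (out : Int) : Prop := out = count_placeholders_py_alt content
instance (content : String) (out : Int) : Decidable (Spec_count_placeholders_py content out) := by unfold Spec_count_placeholders_py; infer_instance

-- ===== CLAIM (what is proved, stated in full; the proofs are below) =====
def Claim_equal_count_placeholders_py : Prop := ∀ (content : String), Dom_count_placeholders_py content → Spec_count_placeholders_py content (count_placeholders_py content)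

-- ===== LEMMAS AND PROOFS =====

-- number of positions of l at which p starts (counting every occurrence, overlapping or not)
def pvPosCount (p : List Char) : List Char → Nat
  | [] => 0
  | c :: t => (if p.isPrefixOf (c :: t) then 1 else 0) + pvPosCount p t

-- the B-side per-pattern count over the range of start positions is pvPosCount
theorem pv_countP_range (p s : List Char) :
    (List.range s.length).countP (fun i => p.isPrefixOf (s.drop i)) = pvPosCount p s := by
  induction s with
  | nil => simp [pvPosCount]
  | cons c t ih =>
    rw [List.length_cons, List.range_succ_eq_map, List.countP_cons, List.countP_map]
    simp only [Function.comp_def, List.drop_succ_cons, List.drop_zero]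
    rw [ih]
    simp [pvPosCount, Nat.add_comm]

-- strictly inside an occurrence of p, no occurrence of p can start (p has no self-overlap)
theorem pv_not_prefix_inner (p l : List Char)
    (hover : ∀ k < p.length, 0 < k → ¬ p.drop k <+: p)
    (hpl : p <+: l) (j : Nat) (h0 : 0 < j) (hj : j < p.length) : ¬ p <+: l.drop j := by
  obtain ⟨r, rfl⟩ := hpl
  intro hcon
  rw [List.drop_append_of_le_length hj.le] at hcon
  apply hover j hj h0
  have heq : p = ((p.drop j ++ r).take p.length) := List.prefix_iff_eq_take.mp hcon
  have h2 := congrArg (List.take (p.length - j)) heq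
  rw [List.take_take, min_eq_left (Nat.sub_le _ _),
    List.take_left' (by simp)] at h2
  rw [← h2]
  exact List.take_prefix _ _

theorem pv_posCount_drop_succ (p l : List Char) (j : Nat) (hj : j < l.length) :
    pvPosCount p (l.drop j) =
      (if p.isPrefixOf (l.drop j) then 1 else 0) + pvPosCount p (l.drop (j + 1)) := by
  rw [List.drop_eq_getElem_cons hj]
  rfl

theorem pv_match_block (p l : List Char) (hp : p ≠ [])
    (hover : ∀ k < p.length, 0 < k → ¬ p.drop k <+: p) (hpl : p <+: l) :
    ∀ (d j : Nat), j + d = p.length →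
      pvPosCount p (l.drop j) = (if j = 0 then 1 else 0) + pvPosCount p (l.drop p.length) := by
  intro d
  induction d with
  | zero =>
    intro j hd
    have hj0 : j ≠ 0 := by
      intro h; apply hp; apply List.eq_nil_of_length_eq_zero; omega
    simp [hj0, ← hd]
  | succ d ih =>
    intro j hd
    have hjp : j < p.length := by omega
    have hjl : j < l.length := lt_of_lt_of_le hjp hpl.length_le
    rw [pv_posCount_drop_succ p l j hjl, ih (j + 1) (by omega)]
    by_cases h0 : j = 0
    · subst h0
      have hpre : p.isPrefixOf (l.drop 0) := by
        rw [List.drop_zero]; exact List.isPrefixOf_iff_prefix.mpr hpl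
      simp [hpl]
    · have hnp : ¬ p <+: l.drop j :=
        pv_not_prefix_inner p l hover hpl j (Nat.pos_of_ne_zero h0) hjp
      have hbool : ¬ p.isPrefixOf (l.drop j) := by
        rw [List.isPrefixOf_iff_prefix]; exact hnp
      simp [hbool, h0]

theorem pv_posCount_match (p l : List Char) (hp : p ≠ [])
    (hover : ∀ k < p.length, 0 < k → ¬ p.drop k <+: p) (hpl : p <+: l) :
    pvPosCount p l = 1 + pvPosCount p (l.drop p.length) := by
  have := pv_match_block p l hp hover hpl p.length 0 (by omega)
  simpa using this

-- A's non-overlapping scanner counts exactly the start positions, for a self-overlap-free pattern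
theorem pv_go_spec (p : List Char) (hp : p ≠ [])
    (hover : ∀ k < p.length, 0 < k → ¬ p.drop k <+: p) :
    ∀ (fuel : Nat) (l : List Char) (acc : Nat), l.length ≤ fuel →
      PySem.Chars.count.go p fuel l acc = acc + pvPosCount p l := by
  intro fuel
  induction fuel with
  | zero =>
    intro l acc hl
    have : l = [] := List.eq_nil_of_length_eq_zero (by omega)
    subst this; rfl
  | succ fuel ih =>
    intro l acc hl
    cases l with
    | nil => rfl
    | cons c t =>
      rw [PySem.Chars.count.go]
      by_cases hpre : p.isPrefixOf (c :: t)
      · have hpl : p <+: c :: t := List.isPrefixOf_iff_prefix.mp hpre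
        have hlen : (List.drop p.length (c :: t)).length ≤ fuel := by
          rw [List.length_drop]
          have : 0 < p.length := List.length_pos_of_ne_nil hp
          simp at hl ⊢; omega
        rw [if_pos hpre, ih _ _ hlen, pv_posCount_match p (c :: t) hp hover hpl]
        omega
      · have hlen : t.length ≤ fuel := by simp at hl; omega
        rw [if_neg hpre, ih _ _ hlen]
        simp [pvPosCount, hpre]

theorem pv_count_eq_pos (p s : List Char) (hp : p ≠ [])
    (hover : ∀ k < p.length, 0 < k → ¬ p.drop k <+: p) :
    PySem.Chars.count s p = pvPosCount p s := by
  unfold PySem.Chars.count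
  rw [if_neg (by simpa using hp), pv_go_spec p hp hover s.length s 0 (le_refl _)]
  omega

-- exchange the two summations (over positions / over patterns)
theorem pv_sum_swap (phs : List (List Char)) (s : List Char) :
    ((List.range s.length).map
        (fun i => ((phs.countP (fun p => p.isPrefixOf (s.drop i))) : Int))).sum
      = (phs.map
        (fun p => (((List.range s.length).countP (fun i => p.isPrefixOf (s.drop i))) : Int))).sum := by
  induction phs with
  | nil => simp
  | cons p ps ih =>
    simp only [List.countP_cons, List.map_cons, List.sum_cons]
    push_cast
    rw [PySem.List.sum_map_add_int, ih, PySem.List.sum_map_ite_one_zero]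
    omega

theorem pv_main (content : String) :
    count_placeholders_py content = count_placeholders_py_alt content := by
  unfold count_placeholders_py count_placeholders_py_alt
  simp only [List.foldl_cons, List.foldl_nil, PySem.Str.count_eq,
    PySem.List.foldl_add, pv_sum_swap, List.map_cons, List.map_nil, List.sum_cons, List.sum_nil,
    pv_countP_range]
  rw [pv_count_eq_pos _ _ (by decide) (by decide),
      pv_count_eq_pos _ _ (by decide) (by decide),
      pv_count_eq_pos _ _ (by decide) (by decide),
      pv_count_eq_pos _ _ (by decide) (by decide),
      pv_count_eq_pos _ _ (by decide) (by decide),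
      pv_count_eq_pos _ _ (by decide) (by decide),
      pv_count_eq_pos _ _ (by decide) (by decide)]
  push_cast
  ring

-- ===== VERDICT (by name: the statement is the Claim_ definition above) =====
theorem count_placeholders_py_spec : Claim_equal_count_placeholders_py := by
  intro content _
  unfold Spec_count_placeholders_py
  exact pv_main content
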